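-- pv_equiv track=rewrite | github.com/returntohealthtw-maker/AutomaticDetection | 後端系統/app/algorithms/brainwave.py | _calc_zone
-- ===== SOURCE A (Python) =====
-- def _calc_zone(values, threshold):
--     zone = [0] * (len(threshold) - 1)
--     for v in values:
--         for j in range(1, len(threshold)):
--             if threshold[j - 1] <= v <= threshold[j]:
--                 zone[j - 1] += 1
--                 break
--     return zone
-- ===== SOURCE B (Python) =====
-- def _calc_zone(values, threshold):
--     # Tally duplicate values once, then classify each DISTINCT value a single time.
--     counts = {}
--     for v in values:
--         counts[v] = counts.get(v, 0) + 1
--     bounds = list(zip(threshold, threshold[1:]))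
--     zone = [0] * len(bounds)
--     for v, c in counts.items():
--         i = 0
--         for lo, hi in bounds:
--             if lo <= v <= hi:
--                 zone[i] += c
--                 break
--             i += 1
--     return zone
-- ===== Notes on version B (the rewrite author's own statement) =====
-- stated objective: alternative
-- what changed: B first builds a dict tallying how many times each value occurs, then classifies each DISTINCT value once against the list of consecutive threshold pairs and adds its whole tally to the zone, instead of A's rescanning the thresholds for every element of values.
import Mathlib
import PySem

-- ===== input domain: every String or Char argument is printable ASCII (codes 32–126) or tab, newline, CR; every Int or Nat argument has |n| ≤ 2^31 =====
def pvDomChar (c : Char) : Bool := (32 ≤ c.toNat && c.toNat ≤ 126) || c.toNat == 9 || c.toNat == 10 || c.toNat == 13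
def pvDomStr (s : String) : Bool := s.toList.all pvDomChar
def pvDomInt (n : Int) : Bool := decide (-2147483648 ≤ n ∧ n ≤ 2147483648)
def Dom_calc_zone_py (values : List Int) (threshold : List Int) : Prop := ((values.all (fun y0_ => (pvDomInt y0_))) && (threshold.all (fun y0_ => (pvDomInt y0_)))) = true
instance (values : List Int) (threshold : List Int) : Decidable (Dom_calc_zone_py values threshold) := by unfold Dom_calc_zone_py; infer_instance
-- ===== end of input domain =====

-- B tallies duplicate values in a dict once and classifies each DISTINCT value a single time
-- (alternative decomposition; faster only on duplicate-heavy inputs).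

-- ===== PORT A =====
-- inner 'for j in range(1, len(threshold)): … break' loop of A; every index j and j-1 is in
-- range, so the plain getD access is exact here.
def calcZoneScanA (threshold : List Int) (v : Int) (js : List Nat) (zone : List Int) : List Int :=
  match js with
  | [] => zone
  | j :: rest =>
    if threshold.getD (j - 1) 0 ≤ v ∧ v ≤ threshold.getD j 0 then
      zone.set (j - 1) (zone.getD (j - 1) 0 + 1)
    else
      calcZoneScanA threshold v rest zone

def calc_zone_py (values : List Int) (threshold : List Int) : List Int :=
  -- zone = [0] * (len(threshold) - 1)  ([0]*(-1) = [] matches Nat subtraction)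
  -- for v in values: for j in range(1, len(threshold)): …
  values.foldl
    (fun zone v => calcZoneScanA threshold v (List.range' 1 (threshold.length - 1)) zone)
    (List.replicate (threshold.length - 1) 0)

-- ===== PORT B =====
-- inner 'i = 0; for lo, hi in bounds: … break; i += 1' loop of B.
def calcZoneScanB (v : Int) (c : Int) (bounds : List (Int × Int)) (i : Nat) (zone : List Int) : List Int :=
  match bounds with
  | [] => zone
  | (lo, hi) :: rest =>
    if lo ≤ v ∧ v ≤ hi then
      zone.set i (zone.getD i 0 + c)
    else
      calcZoneScanB v c rest (i + 1) zone

def calc_zone_py_alt (values : List Int) (threshold : List Int) : List Int :=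
  -- counts[v] = counts.get(v, 0) + 1
  let counts : PySem.Dict Int Int :=
    values.foldl (fun d v => d.insert v (d.getD v 0 + 1)) PySem.Dict.empty
  -- bounds = list(zip(threshold, threshold[1:]))  (threshold.drop 1 = threshold[1:], exact)
  let bounds := threshold.zip (threshold.drop 1)
  -- for v, c in counts.items(): …
  counts.items.foldl
    (fun zone vc => calcZoneScanB vc.1 vc.2 bounds 0 zone)
    (List.replicate bounds.length 0)

-- ===== PRECONDITION & SPEC =====
def Spec_calc_zone_py (values : List Int) (threshold : List Int) (out : List Int) : Prop := out = calc_zone_py_alt values threshold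
instance (values : List Int) (threshold : List Int) (out : List Int) : Decidable (Spec_calc_zone_py values threshold out) := by unfold Spec_calc_zone_py; infer_instance

-- ===== CLAIM (what is proved, stated in full; the proofs are below) =====
def Claim_equal_calc_zone_py : Prop := ∀ (values : List Int) (threshold : List Int), Dom_calc_zone_py values threshold → Spec_calc_zone_py values threshold (calc_zone_py values threshold)

-- ===== LEMMAS AND PROOFS =====

-- the zone index of a value: first pair of consecutive thresholds enclosing it
def zoneIdx (threshold : List Int) (v : Int) : Option Nat :=
  (threshold.zip (threshold.drop 1)).findIdx? (fun b => decide (b.1 ≤ v ∧ v ≤ b.2))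

-- one common 'classify v, add c to its zone' step
def zstep (threshold : List Int) (c : Int) (zone : List Int) (v : Int) : List Int :=
  match zoneIdx threshold v with
  | some m => zone.set m (zone.getD m 0 + c)
  | none => zone

theorem scanB_eq_findIdx (v c : Int) :
    ∀ (bs : List (Int × Int)) (i : Nat) (zone : List Int),
    calcZoneScanB v c bs i zone =
      match bs.findIdx? (fun b => decide (b.1 ≤ v ∧ v ≤ b.2)) with
      | some m => zone.set (i + m) (zone.getD (i + m) 0 + c)
      | none => zone := by
  intro bs
  induction bs with
  | nil => intro i zone; simp [calcZoneScanB]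
  | cons b rest ih =>
    intro i zone
    obtain ⟨lo, hi⟩ := b
    by_cases h : lo ≤ v ∧ v ≤ hi
    · simp [calcZoneScanB, List.findIdx?_cons, h]
    · simp only [calcZoneScanB, List.findIdx?_cons, if_neg h, decide_eq_true_eq, h,
        decide_false, ih]
      cases hfind : rest.findIdx? (fun b => decide (b.1 ≤ v ∧ v ≤ b.2)) with
      | none => simp [hfind]
      | some m =>
        simp [hfind]
        have : i + 1 + m = i + (m + 1) := by omega
        rw [this]

theorem scanB_eq_zstep (threshold : List Int) (v c : Int) (zone : List Int) :
    calcZoneScanB v c (threshold.zip (threshold.drop 1)) 0 zone = zstep threshold c zone v := by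
  rw [scanB_eq_findIdx]
  unfold zstep zoneIdx
  cases (threshold.zip (threshold.drop 1)).findIdx? (fun b => decide (b.1 ≤ v ∧ v ≤ b.2)) with
  | none => rfl
  | some m => simp

theorem scanA_eq_scanB (threshold : List Int) (v : Int) :
    ∀ (m s : Nat), m = threshold.length - (s + 1) →
    ∀ (zone : List Int),
    calcZoneScanA threshold v (List.range' (s + 1) m) zone =
      calcZoneScanB v 1 ((threshold.drop s).zip (threshold.drop (s + 1))) s zone := by
  intro m
  induction m with
  | zero =>
    intro s hm zone
    have hd : threshold.drop (s + 1) = [] := by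
      apply List.drop_eq_nil_of_le; omega
    simp [calcZoneScanA, hd, calcZoneScanB]
  | succ m ih =>
    intro s hm zone
    have hs1 : s + 1 < threshold.length := by omega
    have hs : s < threshold.length := by omega
    have hds : threshold.drop s = threshold[s] :: threshold.drop (s + 1) :=
      List.drop_eq_getElem_cons hs
    have hds1 : threshold.drop (s + 1) = threshold[s + 1] :: threshold.drop (s + 2) :=
      List.drop_eq_getElem_cons hs1
    rw [List.range'_succ]
    conv_rhs => rw [hds, hds1]
    simp only [List.zip_cons_cons, calcZoneScanA, calcZoneScanB]
    have h1 : threshold.getD (s + 1 - 1) 0 = threshold[s] := by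
      simp [List.getD_eq_getElem?_getD, List.getElem?_eq_getElem hs]
    have h2 : threshold.getD (s + 1) 0 = threshold[s + 1] := by
      simp [List.getD_eq_getElem?_getD, List.getElem?_eq_getElem hs1]
    rw [h1, h2]
    by_cases h : threshold[s] ≤ v ∧ v ≤ threshold[s + 1]
    · simp [h]
    · rw [if_neg h, if_neg h, ← hds1, ih (s + 1) (by omega)]

theorem length_zstep (threshold : List Int) (c : Int) (zone : List Int) (v : Int) :
    (zstep threshold c zone v).length = zone.length := by
  unfold zstep
  cases zoneIdx threshold v <;> simp

theorem zoneIdx_lt (threshold : List Int) (v : Int) (m : Nat)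
    (h : zoneIdx threshold v = some m) : m < (threshold.zip (threshold.drop 1)).length := by
  unfold zoneIdx at h
  exact List.findIdx?_eq_some_iff_findIdx_eq.mp h |>.1

theorem getD_zstep (threshold : List Int) (c : Int) (zone : List Int) (v : Int) (i : Nat)
    (hlen : zone.length = (threshold.zip (threshold.drop 1)).length) :
    (zstep threshold c zone v).getD i 0 =
      zone.getD i 0 + (if zoneIdx threshold v = some i then c else 0) := by
  unfold zstep
  cases hz : zoneIdx threshold v with
  | none => simp
  | some m =>
    have hm : m < zone.length := hlen ▸ zoneIdx_lt threshold v m hz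
    simp only [List.getD_eq_getElem?_getD, List.getElem?_set_of_lt' _ _ hm]
    by_cases him : m = i
    · subst him; simp
    · simp [him]

theorem foldA_getD (threshold : List Int) (i : Nat)
    (hi : i < (threshold.zip (threshold.drop 1)).length) :
    ∀ (vals : List Int) (zone : List Int)
      (hlen : zone.length = (threshold.zip (threshold.drop 1)).length),
      (vals.foldl (fun z v => zstep threshold 1 z v) zone).getD i 0 =
        zone.getD i 0 + (vals.countP (fun v => zoneIdx threshold v == some i) : Int) := by
  intro vals
  induction vals with
  | nil => intro zone hlen; simp
  | cons v vs ih =>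
    intro zone hlen
    rw [List.foldl_cons, ih _ (by rw [length_zstep]; exact hlen),
      getD_zstep threshold 1 zone v i hlen, List.countP_cons]
    by_cases h : zoneIdx threshold v = some i
    · simp [h]; push_cast; ring
    · simp [h]

theorem foldB_getD (threshold : List Int) (i : Nat)
    (hi : i < (threshold.zip (threshold.drop 1)).length) :
    ∀ (items : List (Int × Int)) (zone : List Int)
      (hlen : zone.length = (threshold.zip (threshold.drop 1)).length),
      (items.foldl (fun z vc => zstep threshold vc.2 z vc.1) zone).getD i 0 =
        zone.getD i 0 +
          (items.map (fun vc => if zoneIdx threshold vc.1 = some i then vc.2 else 0)).sum := by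
  intro items
  induction items with
  | nil => intro zone hlen; simp
  | cons vc rest ih =>
    intro zone hlen
    rw [List.foldl_cons, ih _ (by rw [length_zstep]; exact hlen),
      getD_zstep threshold vc.2 zone vc.1 i hlen]
    simp; ring

-- a sum over a Nodup list splits into the term at x and the sum over discard
theorem sum_discard (x : Int) (f : Int → Int) :
    ∀ (s : List Int), s.Nodup →
    (s.map f).sum = ((PySem.Set.discard s x).map f).sum + (if x ∈ s then f x else 0) := by
  intro s
  induction s with
  | nil => simp [PySem.Set.discard]
  | cons a rest ih =>
    intro hnd
    have hndr : rest.Nodup := (List.nodup_cons.mp hnd).2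
    have hna : a ∉ rest := (List.nodup_cons.mp hnd).1
    by_cases hax : a = x
    · subst hax
      have hfilter : List.filter (fun y => !(y == a)) rest = rest :=
        List.filter_eq_self.mpr (fun y hy => by simp; rintro rfl; exact hna hy)
      simp [PySem.Set.discard, hfilter, add_comm]
    · have hne : (a == x) = false := by simp [hax]
      have hxa : ¬ x = a := fun h => hax h.symm
      simp only [PySem.Set.discard, List.filter_cons, hne, Bool.not_false, if_true,
        List.map_cons, List.sum_cons, List.mem_cons, hxa, false_or]
      rw [ih hndr]
      simp only [PySem.Set.discard]
      ring

-- grouped sum over the distinct values with multiplicities = plain countP over the list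
theorem sum_grouped (p : Int → Bool) :
    ∀ (xs : List Int),
    ((PySem.Set.ofList xs).map (fun v => if p v then (xs.count v : Int) else 0)).sum =
      (xs.countP p : Int) := by
  intro xs
  induction xs with
  | nil => simp [PySem.Set.ofList]
  | cons x rest ih =>
    rw [PySem.Set.ofList_cons, List.map_cons, List.sum_cons]
    have hnd : (PySem.Set.ofList rest).Nodup := PySem.Set.nodup_ofList rest
    have hsplit := sum_discard x (fun v => if p v then ((rest.count v : Nat) : Int) else 0)
      (PySem.Set.ofList rest) hnd
    have hmem : x ∈ PySem.Set.ofList rest ↔ x ∈ rest := PySem.Set.mem_ofList rest x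
    -- counts over (x :: rest) agree with counts over rest away from x
    have hcongr : ((PySem.Set.discard (PySem.Set.ofList rest) x).map
          (fun v => if p v then ((x :: rest).count v : Int) else 0)) =
        ((PySem.Set.discard (PySem.Set.ofList rest) x).map
          (fun v => if p v then ((rest.count v : Nat) : Int) else 0)) := by
      apply List.map_congr_left
      intro v hv
      have hvx : v ≠ x := ((PySem.Set.mem_discard _ x v).mp hv).2
      rw [List.count_cons_of_ne (Ne.symm hvx)]
    rw [hcongr, List.countP_cons, List.count_cons_self]
    simp only [hmem] at hsplit
    by_cases hp : p x
    · by_cases hxr : x ∈ rest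
      · simp [hp, hxr] at hsplit ⊢
        omega
      · have hc0 : rest.count x = 0 := List.count_eq_zero.mpr hxr
        simp [hp, hxr, hc0] at hsplit ⊢
        omega
    · simp [hp] at hsplit ⊢
      omega

theorem length_foldl_zstep (threshold : List Int) (c : Int → Int) :
    ∀ (l : List Int) (zone : List Int),
    (l.foldl (fun z v => zstep threshold (c v) z v) zone).length = zone.length := by
  intro l
  induction l with
  | nil => intro zone; rfl
  | cons v vs ih => intro zone; rw [List.foldl_cons, ih, length_zstep]

theorem length_foldl_zstep_pairs (threshold : List Int) :
    ∀ (l : List (Int × Int)) (zone : List Int),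
    (l.foldl (fun z vc => zstep threshold vc.2 z vc.1) zone).length = zone.length := by
  intro l
  induction l with
  | nil => intro zone; rfl
  | cons vc rest ih => intro zone; rw [List.foldl_cons, ih, length_zstep]

-- B's fold of the literal inner scan is the fold of the common step
theorem foldl_scanB_eq_foldl_zstep (threshold : List Int) :
    ∀ (l : List (Int × Int)) (zone : List Int),
    l.foldl (fun z vc => calcZoneScanB vc.1 vc.2 (threshold.zip (threshold.drop 1)) 0 z) zone =
      l.foldl (fun z vc => zstep threshold vc.2 z vc.1) zone := by
  intro l
  induction l with
  | nil => intro zone; rfl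
  | cons vc rest ih =>
    intro zone
    rw [List.foldl_cons, List.foldl_cons, scanB_eq_zstep, ih]

-- ===== VERDICT (by name: the statement is the Claim_ definition above) =====
theorem calc_zone_py_spec : Claim_equal_calc_zone_py := by
  intro values threshold _
  unfold Spec_calc_zone_py calc_zone_py calc_zone_py_alt
  have hK : (threshold.zip (threshold.drop 1)).length = threshold.length - 1 := by
    simp [List.length_zip]
  have hstepA : ∀ (zone : List Int) (v : Int),
      calcZoneScanA threshold v (List.range' 1 (threshold.length - 1)) zone =
        zstep threshold 1 zone v := by
    intro zone v
    have h := scanA_eq_scanB threshold v (threshold.length - 1) 0 (by omega) zone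
    simp only [List.drop_zero, Nat.zero_add] at h
    rw [h, scanB_eq_zstep]
  simp only [hstepA]
  rw [PySem.Dict.foldl_insert_getD_add_one_eq_counter, PySem.Dict.items_counter,
    foldl_scanB_eq_foldl_zstep, ← hK]
  have hlenA : (values.foldl (fun z v => zstep threshold 1 z v)
      (List.replicate (threshold.zip (threshold.drop 1)).length (0 : Int))).length =
      (threshold.zip (threshold.drop 1)).length := by
    rw [length_foldl_zstep threshold (fun _ => (1 : Int))]; simp
  have hlenB : (((PySem.Set.ofList values).map (fun k => (k, (values.count k : Int)))).foldl
      (fun z vc => zstep threshold vc.2 z vc.1)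
      (List.replicate (threshold.zip (threshold.drop 1)).length (0 : Int))).length =
      (threshold.zip (threshold.drop 1)).length := by
    rw [length_foldl_zstep_pairs]; simp
  apply List.ext_getElem?
  intro i
  by_cases hi : i < (threshold.zip (threshold.drop 1)).length
  · rw [List.getElem?_eq_getElem (by rw [hlenA]; exact hi),
      List.getElem?_eq_getElem (by rw [hlenB]; exact hi)]
    congr 1
    rw [← List.getD_eq_getElem _ 0 (by rw [hlenA]; exact hi),
      ← List.getD_eq_getElem _ 0 (by rw [hlenB]; exact hi),
      foldA_getD threshold i hi values _ (by simp),
      foldB_getD threshold i hi _ _ (by simp), List.map_map]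
    have hfun : ((fun vc : Int × Int => if zoneIdx threshold vc.1 = some i then vc.2 else 0) ∘
          (fun k => (k, (values.count k : Int)))) =
        (fun v => if (fun w => zoneIdx threshold w == some i) v then (values.count v : Int) else 0) := by
      funext k
      by_cases h : zoneIdx threshold k = some i <;> simp [Function.comp, h]
    rw [hfun, sum_grouped (fun w => zoneIdx threshold w == some i) values]
  · exact (List.getElem?_eq_none (by rw [hlenA]; omega)).trans
      (List.getElem?_eq_none (by rw [hlenB]; omega)).symm
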